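-- pv_equiv track=rewrite | github.com/cheesezhishi9/Data-Structure | assignments/assignment4/problem_2.py | reshape_array
-- ===== SOURCE A (Python) =====
-- def reshape_array(arr, new_shape):
--     # please write your code here
--     k = new_shape[0]
--     m = new_shape[1]
--     n = new_shape[2]
--     reshaped_array = [[[0] * n for _ in range(m)] for _ in range(k)]
--
--
--     def next(arr,idx):
--         k = len(arr)
--         m = len(arr[0])
--         n = len(arr[0][0])
--         if idx < n:
--             return arr[0][0][idx]
--         elif n <= idx < m * n:
--             idx_m = idx // n
--             idx_n = idx - (idx // n) * n
--             return arr[0][idx_m][idx_n]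
--         elif idx >= m * n:
--             idx_k = idx // (m * n)
--             idx_m = ((idx - m * n) % (m * n)) // n
--             idx_n = ((idx - m * n) % (m * n)) % n
--             return arr[idx_k][idx_m][idx_n]
--
--     idx = 0
--     for i in range(k):
--         for j in range(m):
--             for p in range(n):
--                 reshaped_array[i][j][p] = next(arr,idx)
--                 idx += 1
--
--     return reshaped_array
-- ===== SOURCE B (Python) =====
-- def reshape_array(arr, new_shape):
--     k, m, n = new_shape
--     it = iter(x for plane in arr for row in plane for x in row)
--     result = []
--     for _ in range(k):
--         plane = []
--         for _ in range(m):
--             row = []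
--             for _ in range(n):
--                 row.append(next(it))
--             plane.append(row)
--         result.append(plane)
--     return result
-- ===== Notes on version B (the rewrite author's own statement) =====
-- stated objective: simpler
-- what changed: B flattens the source array once and fills the new k×m×n structure by consuming a single iterator sequentially (building rows by append), replacing A's preallocated zero structure mutated in place and its per-cell three-branch div/mod index arithmetic.
-- outside the precondition, e.g. on reshape_array([[[1], [2, 9], [3]]], (1, 3, 1)): A returns [[[1], [2], [3]]], B returns [[[1], [2], [9]]]; on reshape_array([[[1, 2], [3, 4, 5]]], (1, 1, 2)): A returns [[[1, 2]]], B returns [[[1, 2]]]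
import Mathlib
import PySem

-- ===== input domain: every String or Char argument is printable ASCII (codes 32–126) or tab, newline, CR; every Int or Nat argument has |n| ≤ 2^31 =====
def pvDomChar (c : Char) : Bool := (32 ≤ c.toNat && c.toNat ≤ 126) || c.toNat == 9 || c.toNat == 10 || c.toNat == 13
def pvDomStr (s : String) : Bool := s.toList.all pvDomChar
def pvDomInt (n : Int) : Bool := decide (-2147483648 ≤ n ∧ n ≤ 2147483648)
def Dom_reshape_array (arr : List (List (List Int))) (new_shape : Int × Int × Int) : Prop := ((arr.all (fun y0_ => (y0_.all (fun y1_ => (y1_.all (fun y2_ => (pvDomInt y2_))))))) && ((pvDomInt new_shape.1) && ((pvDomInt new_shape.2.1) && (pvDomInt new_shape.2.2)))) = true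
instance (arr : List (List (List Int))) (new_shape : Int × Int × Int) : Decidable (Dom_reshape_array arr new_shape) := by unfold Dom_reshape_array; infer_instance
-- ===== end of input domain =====

-- B replaces A's preallocated zero structure mutated in place via three-branch div/mod
-- index arithmetic by flattening the source once and consuming it sequentially (simpler).

-- ===== PORT A =====
-- A's inner `next(arr, idx)`: each `none` of a PySem primitive is a Python exception
-- (IndexError / ZeroDivisionError); those inputs are excluded by Pre_ and the port
-- returns a 0 default there.  The final `else` is Python's implicit `return None`
-- (unreachable for idx ≥ 0).
def pvNextA (arr : List (List (List Int))) (idx : Int) : Int :=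
  match PySem.List.pyGet? arr 0 with
  | none => 0      -- len(arr[0]) raises IndexError (outside Pre_)
  | some a0 =>
    match PySem.List.pyGet? a0 0 with
    | none => 0    -- len(arr[0][0]) raises IndexError (outside Pre_)
    | some a00 =>
      let m : Int := a0.length
      let n : Int := a00.length
      if idx < n then
        (PySem.List.pyGet? a00 idx).getD 0
      else if n ≤ idx ∧ idx < m * n then
        let idx_m := PySem.Int.floordiv idx n
        let idx_n := idx - (PySem.Int.floordiv idx n) * n
        ((PySem.List.pyGet? a0 idx_m).bind (fun r => PySem.List.pyGet? r idx_n)).getD 0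
      else if m * n ≤ idx then
        if m * n = 0 then 0    -- idx // (m*n) raises ZeroDivisionError (outside Pre_)
        else
          let idx_k := PySem.Int.floordiv idx (m * n)
          let idx_m := PySem.Int.floordiv (PySem.Int.mod (idx - m * n) (m * n)) n
          let idx_n := PySem.Int.mod (PySem.Int.mod (idx - m * n) (m * n)) n
          (((PySem.List.pyGet? arr idx_k).bind (fun pl => PySem.List.pyGet? pl idx_m)).bind
            (fun r => PySem.List.pyGet? r idx_n)).getD 0
      else 0       -- Python: falls through, returns None (unreachable for idx ≥ 0)

-- the triple loop mutates reshaped_array[i][j][p] in place; the indices produced by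
-- range(...) are nonnegative and within the preallocated structure, so List.modify/set
-- at .toNat is exactly Python's item assignment here.  [0] * n = replicate n.toNat 0.
def reshape_array (arr : List (List (List Int))) (new_shape : Int × Int × Int) : List (List (List Int)) :=
  let k := new_shape.1
  let m := new_shape.2.1
  let n := new_shape.2.2
  let reshaped : List (List (List Int)) :=
    (PySem.List.pyRange 0 k 1).map (fun _ =>
      (PySem.List.pyRange 0 m 1).map (fun _ => List.replicate n.toNat 0))
  let st :=
    (PySem.List.pyRange 0 k 1).foldl (fun st i =>
      (PySem.List.pyRange 0 m 1).foldl (fun st j =>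
        (PySem.List.pyRange 0 n 1).foldl (fun st p =>
          (st.1.modify i.toNat (fun pl => pl.modify j.toNat (fun row => row.set p.toNat (pvNextA arr st.2))),
           st.2 + 1))
        st) st) (reshaped, (0 : Int))
  st.1

-- ===== PORT B =====
-- Source B: flatten once, then fill by consuming an iterator.  The iterator is the pair's
-- second component (the unconsumed suffix of flat); next(it) = headD/tail, the 0
-- default standing where Python's next would raise StopIteration (outside Pre_).
def reshape_array_alt (arr : List (List (List Int))) (new_shape : Int × Int × Int) : List (List (List Int)) :=
  let k := new_shape.1
  let m := new_shape.2.1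
  let n := new_shape.2.2
  let flat := arr.flatMap (fun plane => plane.flatMap (fun row => row))
  let st :=
    (PySem.List.pyRange 0 k 1).foldl (fun st _ =>
      let inner := (PySem.List.pyRange 0 m 1).foldl (fun st2 _ =>
          let r := (PySem.List.pyRange 0 n 1).foldl (fun st3 _ =>
              (st3.1 ++ [st3.2.headD 0], st3.2.tail)) (([] : List Int), st2.2)
          (st2.1 ++ [r.1], r.2)) (([] : List (List Int)), st.2)
      (st.1 ++ [inner.1], inner.2)) (([] : List (List (List Int))), flat)
  st.1

-- ===== PRECONDITION & SPEC =====
def pvRect (arr : List (List (List Int))) : Bool :=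
  arr.all (fun pl => pl.length == (arr.headD []).length &&
    pl.all (fun r => r.length == ((arr.headD []).headD []).length))

-- Pre_ excludes (when the new shape is non-empty) ragged source arrays — on which A
-- reads every plane through the dimensions of arr[0]/arr[0][0], silently skipping or
-- double-reading elements of uneven rows, an artefact no reshape would specify — and
-- new shapes with more cells than the source provides, on which A raises IndexError.
def Pre_reshape_array (arr : List (List (List Int))) (new_shape : Int × Int × Int) : Prop :=
  new_shape.1.toNat * new_shape.2.1.toNat * new_shape.2.2.toNat = 0 ∨
  (pvRect arr = true ∧
    new_shape.1.toNat * new_shape.2.1.toNat * new_shape.2.2.toNat ≤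
      arr.length * (arr.headD []).length * ((arr.headD []).headD []).length)

instance (arr : List (List (List Int))) (new_shape : Int × Int × Int) : Decidable (Pre_reshape_array arr new_shape) := by
  unfold Pre_reshape_array; infer_instance

def pvWitness_reshape_array : List (List (List Int)) × (Int × Int × Int) :=
  ([[[1, 2], [3, 4]]], (2, 2, 1))

def Spec_reshape_array (arr : List (List (List Int))) (new_shape : Int × Int × Int) (out : List (List (List Int))) : Prop := out = reshape_array_alt arr new_shape
instance (arr : List (List (List Int))) (new_shape : Int × Int × Int) (out : List (List (List Int))) : Decidable (Spec_reshape_array arr new_shape out) := by unfold Spec_reshape_array; infer_instance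

-- ===== CLAIM (what is proved, stated in full; the proofs are below) =====
def Claim_equal_reshape_array : Prop := ∀ (arr : List (List (List Int))) (new_shape : Int × Int × Int), Dom_reshape_array arr new_shape → Pre_reshape_array arr new_shape → Spec_reshape_array arr new_shape (reshape_array arr new_shape)

-- ===== LEMMAS AND PROOFS =====

theorem pvModifyModify {α : Type} (l : List α) (i : ℕ) (f g : α → α) :
    (l.modify i f).modify i g = l.modify i (fun a => g (f a)) := by
  apply List.ext_getElem?
  intro j
  by_cases h : i = j <;> simp [List.getElem?_modify, h, Option.map_map] <;> rfl

theorem pvModifyId {α : Type} (l : List α) (i : ℕ) :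
    l.modify i (fun a => a) = l := by
  apply List.ext_getElem?
  intro j
  by_cases h : i = j <;> simp [List.getElem?_modify, h]

theorem pvModifyAppend {α : Type} (f : α → α) : ∀ (xs ys : List α),
    (xs ++ ys).modify xs.length f = xs ++ ys.modify 0 f := by
  intro xs
  induction xs with
  | nil => simp
  | cons x t ih =>
    intro ys
    show (x :: (t ++ ys)).modify (t.length + 1) f = x :: (t ++ ys.modify 0 f)
    rw [List.modify_succ_cons, ih ys]

theorem pvFoldModifyReplicate {α : Type} (F : ℕ → α → α) (z : α) : ∀ (L R : ℕ),
    (List.range L).foldl (fun X t => X.modify t (F t)) (List.replicate (L + R) z)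
      = (List.range L).map (fun t => F t z) ++ List.replicate R z := by
  intro L
  induction L with
  | zero => intro R; simp
  | succ L ih =>
    intro R
    have h1 : L + 1 + R = L + (R + 1) := by omega
    rw [h1, List.range_succ, List.foldl_append, ih (R + 1)]
    have hlen : ((List.range L).map (fun t => F t z)).length = L := by simp
    simp only [List.foldl_cons, List.foldl_nil]
    nth_rewrite 2 [← hlen]
    rw [pvModifyAppend, List.replicate_succ, List.modify_zero_cons]
    simp [List.range_succ]

theorem pvFoldModifyReplicate0 {α : Type} (F : ℕ → α → α) (z : α) (L : ℕ) :
    (List.range L).foldl (fun X t => X.modify t (F t)) (List.replicate L z)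
      = (List.range L).map (fun t => F t z) := by
  have h := pvFoldModifyReplicate F z L 0
  simpa using h

theorem pvGetDDrop (l : List Int) (a p : ℕ) :
    (l.drop a).getD p 0 = l.getD (a + p) 0 := by
  simp [List.getD_eq_getElem?_getD, List.getElem?_drop]

-- generic consume-fold (B's iterator loops): each step appends one chunk and drops c
theorem pvConsumeFold {β γ : Type} (f : List Int → β × List Int) (h : List Int → β) (c : ℕ)
    (hf1 : ∀ r, (f r).1 = h r) (hf2 : ∀ r, (f r).2 = r.drop c) :
    ∀ (l : List γ) (acc : List β) (rest : List Int),
    l.foldl (fun st _ => (st.1 ++ [(f st.2).1], (f st.2).2)) (acc, rest)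
      = (acc ++ (List.range l.length).map (fun j => h (rest.drop (c * j))), rest.drop (c * l.length)) := by
  intro l
  induction l with
  | nil => intro acc rest; simp
  | cons x t ih =>
    intro acc rest
    rw [List.foldl_cons, ih]
    simp only [hf1, hf2, List.length_cons, Prod.mk.injEq, List.drop_drop]
    refine ⟨?_, ?_⟩
    · rw [List.range_succ_eq_map]
      simp only [List.map_cons, List.map_map, Nat.mul_zero, List.drop_zero,
        List.append_assoc, List.singleton_append]
      congr 2
      apply List.map_congr_left
      intro j _
      simp only [Function.comp, Nat.succ_eq_add_one]
      congr 2
      ring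
    · congr 1
      ring

-- closed form of B's port
theorem pvClosedB (arr : List (List (List Int))) (k m n : Int) :
    reshape_array_alt arr (k, m, n)
      = (List.range k.toNat).map (fun i =>
          (List.range m.toNat).map (fun j =>
            (List.range n.toNat).map (fun p =>
              (arr.flatMap (fun plane => plane.flatMap (fun row => row))).getD
                (m.toNat * n.toNat * i + n.toNat * j + p) 0))) := by
  have hinner : ∀ rest : List Int,
      (PySem.List.pyRange 0 n 1).foldl
          (fun st3 _ => (st3.1 ++ [st3.2.headD 0], st3.2.tail)) (([] : List Int), rest)
        = ((List.range n.toNat).map (fun p => rest.getD p 0), rest.drop n.toNat) := by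
    intro rest
    have h := pvConsumeFold (fun r : List Int => (r.headD 0, r.tail)) (fun r => r.getD 0 0) 1
        (by intro r; cases r <;> simp) (by intro r; simp)
        (PySem.List.pyRange 0 n 1) ([] : List Int) rest
    simpa [PySem.List.length_pyRange_one, pvGetDDrop] using h
  have hmid : ∀ rest : List Int,
      (PySem.List.pyRange 0 m 1).foldl
          (fun st2 _ =>
            let r := (PySem.List.pyRange 0 n 1).foldl
                (fun st3 _ => (st3.1 ++ [st3.2.headD 0], st3.2.tail)) (([] : List Int), st2.2)
            (st2.1 ++ [r.1], r.2)) (([] : List (List Int)), rest)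
        = ((List.range m.toNat).map (fun j =>
            (List.range n.toNat).map (fun p => rest.getD (n.toNat * j + p) 0)),
           rest.drop (n.toNat * m.toNat)) := by
    intro rest
    have h := pvConsumeFold
        (fun r : List Int => (PySem.List.pyRange 0 n 1).foldl
            (fun st3 _ => (st3.1 ++ [st3.2.headD 0], st3.2.tail)) (([] : List Int), r))
        (fun r => (List.range n.toNat).map (fun p => r.getD p 0)) n.toNat
        (fun r => congrArg Prod.fst (hinner r)) (fun r => congrArg Prod.snd (hinner r))
        (PySem.List.pyRange 0 m 1) ([] : List (List Int)) rest
    simpa [PySem.List.length_pyRange_one, pvGetDDrop] using h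
  have houter := pvConsumeFold
      (fun r : List Int => (PySem.List.pyRange 0 m 1).foldl
          (fun st2 _ =>
            let rr := (PySem.List.pyRange 0 n 1).foldl
                (fun st3 _ => (st3.1 ++ [st3.2.headD 0], st3.2.tail)) (([] : List Int), st2.2)
            (st2.1 ++ [rr.1], rr.2)) (([] : List (List Int)), r))
      (fun r => (List.range m.toNat).map (fun j =>
          (List.range n.toNat).map (fun p => r.getD (n.toNat * j + p) 0)))
      (n.toNat * m.toNat)
      (fun r => congrArg Prod.fst (hmid r)) (fun r => congrArg Prod.snd (hmid r))
      (PySem.List.pyRange 0 k 1) ([] : List (List (List Int)))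
      (arr.flatMap (fun plane => plane.flatMap (fun row => row)))
  simp only [reshape_array_alt]
  rw [houter]
  simp only [List.nil_append, PySem.List.length_pyRange_one, Int.sub_zero, pvGetDDrop]
  apply List.map_congr_left; intro i _
  apply List.map_congr_left; intro j _
  apply List.map_congr_left; intro p _
  rw [show n.toNat * m.toNat * i + (n.toNat * j + p)
      = m.toNat * n.toNat * i + n.toNat * j + p from by ring]

-- the A-side loop lemmas: pulling the two modifies out of the folds, level by level
theorem pvAL1 (arr : List (List (List Int))) (i' j' : ℕ) : ∀ (L : ℕ) (X : List (List (List Int))) (s : ℤ),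
    (List.range L).foldl (fun st p =>
        (st.1.modify i' (fun pl => pl.modify j' (fun row => row.set p (pvNextA arr st.2))), st.2 + 1)) (X, s)
      = (X.modify i' (fun pl => pl.modify j' (fun row =>
          (List.range L).foldl (fun row p => row.set p (pvNextA arr (s + p))) row)), s + L) := by
  intro L
  induction L with
  | zero =>
    intro X s
    simp [pvModifyId]
  | succ L ih =>
    intro X s
    rw [List.range_succ, List.foldl_append, ih]
    simp only [List.foldl_cons, List.foldl_nil]
    rw [Prod.mk.injEq]
    refine ⟨?_, by push_cast; ring⟩
    rw [pvModifyModify]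
    congr 1
    funext pl
    rw [pvModifyModify]
    congr 1
    funext row
    rw [List.foldl_append]
    simp

theorem pvAL2 (arr : List (List (List Int))) (i' n' : ℕ) : ∀ (L : ℕ) (X : List (List (List Int))) (s : ℤ),
    (List.range L).foldl (fun st j =>
        (List.range n').foldl (fun st p =>
          (st.1.modify i' (fun pl => pl.modify j (fun row => row.set p (pvNextA arr st.2))), st.2 + 1)) st) (X, s)
      = (X.modify i' (fun pl =>
          (List.range L).foldl (fun pl j => pl.modify j (fun row =>
            (List.range n').foldl (fun row p => row.set p (pvNextA arr (s + n' * j + p))) row)) pl),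
         s + n' * L) := by
  intro L
  induction L with
  | zero =>
    intro X s
    simp [pvModifyId]
  | succ L ih =>
    intro X s
    rw [List.range_succ, List.foldl_append, ih]
    simp only [List.foldl_cons, List.foldl_nil]
    rw [pvAL1, pvModifyModify]
    rw [Prod.mk.injEq]
    refine ⟨?_, by push_cast; ring⟩
    congr 1
    funext pl
    rw [List.foldl_append]
    simp only [List.foldl_cons, List.foldl_nil]

theorem pvAL3 (arr : List (List (List Int))) (m' n' : ℕ) : ∀ (L : ℕ) (X : List (List (List Int))) (s : ℤ),
    (List.range L).foldl (fun st i =>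
        (List.range m').foldl (fun st j =>
          (List.range n').foldl (fun st p =>
            (st.1.modify i (fun pl => pl.modify j (fun row => row.set p (pvNextA arr st.2))), st.2 + 1)) st) st) (X, s)
      = ((List.range L).foldl (fun X i => X.modify i (fun pl =>
            (List.range m').foldl (fun pl j => pl.modify j (fun row =>
              (List.range n').foldl (fun row p =>
                row.set p (pvNextA arr (s + (m' * n') * i + n' * j + p))) row)) pl)) X,
         s + (m' * n') * L) := by
  intro L
  induction L with
  | zero =>
    intro X s
    simp
  | succ L ih =>
    intro X s
    rw [List.range_succ, List.foldl_append, ih]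
    simp only [List.foldl_cons, List.foldl_nil]
    rw [pvAL2]
    rw [Prod.mk.injEq]
    refine ⟨?_, by push_cast; ring⟩
    rw [List.foldl_append]
    simp only [List.foldl_cons, List.foldl_nil]

-- closed form of A's port
theorem pvClosedA (arr : List (List (List Int))) (k m n : Int) :
    reshape_array arr (k, m, n)
      = (List.range k.toNat).map (fun i =>
          (List.range m.toNat).map (fun j =>
            (List.range n.toNat).map (fun p =>
              pvNextA arr ((m.toNat * n.toNat * i + n.toNat * j + p : ℕ) : ℤ)))) := by
  simp only [reshape_array, PySem.List.pyRange_one, Int.sub_zero, zero_add, List.foldl_map,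
    List.map_map, Int.toNat_natCast, Function.comp_def]
  rw [show ∀ (L : ℕ) (z : List (List Int)), (List.range L).map (fun _ => z) = List.replicate L z
      from fun L z => by simp, show ∀ (L : ℕ) (z : List Int), (List.range L).map (fun _ => z) = List.replicate L z
      from fun L z => by simp]
  rw [pvAL3]
  rw [pvFoldModifyReplicate0]
  apply List.map_congr_left; intro i _
  rw [pvFoldModifyReplicate0]
  apply List.map_congr_left; intro j _
  simp only [List.set_eq_modify]
  rw [pvFoldModifyReplicate0]
  apply List.map_congr_left; intro p _
  congr 1
  push_cast
  ring

-- flatten indexing, rows level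
theorem pvRowsGetD (N : ℕ) : ∀ (rows : List (List Int)) (b c : ℕ),
    (∀ r ∈ rows, r.length = N) → b < rows.length → c < N →
    rows.flatten.getD (b * N + c) 0 = (rows.getD b []).getD c 0 := by
  intro rows
  induction rows with
  | nil => intro b c _ hb _; simp at hb
  | cons r rs ih =>
    intro b c hN hb hc
    have hr : r.length = N := hN r (List.mem_cons_self ..)
    cases b with
    | zero =>
      simp only [List.flatten_cons, Nat.zero_mul, Nat.zero_add, List.getD_eq_getElem?_getD]
      rw [List.getElem?_append_left (by omega)]
      simp
    | succ b =>
      have hidx : (b + 1) * N + c = r.length + (b * N + c) := by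
        rw [hr]; ring
      simp only [List.flatten_cons, List.getD_eq_getElem?_getD, hidx]
      rw [List.getElem?_append_right (by omega), Nat.add_sub_cancel_left]
      have := ih b c (fun x hx => hN x (List.mem_cons_of_mem _ hx)) (by simpa using hb) hc
      simpa [List.getD_eq_getElem?_getD] using this

theorem pvFlattenLen (N M : ℕ) (rows : List (List Int))
    (hM : rows.length = M) (hN : ∀ r ∈ rows, r.length = N) :
    rows.flatten.length = M * N := by
  have hmap : rows.map List.length = List.replicate M N := by
    rw [List.eq_replicate_iff]
    refine ⟨by simp [hM], ?_⟩
    intro b hb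
    rw [List.mem_map] at hb
    obtain ⟨r, hr, rfl⟩ := hb
    exact hN r hr
  simp [List.length_flatten, hmap, List.sum_replicate, Nat.smul_one_eq_cast]

-- flatten indexing, 3-D
theorem pvFlatGetD (M N : ℕ) : ∀ (arr : List (List (List Int))) (a b c : ℕ),
    (∀ pl ∈ arr, pl.length = M ∧ ∀ r ∈ pl, r.length = N) →
    a < arr.length → b < M → c < N →
    (arr.flatMap (fun plane => plane.flatMap (fun row => row))).getD ((a * M + b) * N + c) 0
      = ((arr.getD a []).getD b []).getD c 0 := by
  intro arr
  induction arr with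
  | nil => intro a b c _ ha _ _; simp at ha
  | cons pl tl ih =>
    intro a b c hRect ha hb hc
    have hpl := hRect pl (List.mem_cons_self ..)
    have hflat : pl.flatMap (fun row => row) = pl.flatten := List.flatMap_id ..
    have hlen : (pl.flatMap (fun row => row)).length = M * N := by
      rw [hflat]; exact pvFlattenLen N M pl hpl.1 hpl.2
    cases a with
    | zero =>
      simp only [List.flatMap_cons, Nat.zero_mul, Nat.zero_add, List.getD_eq_getElem?_getD]
      rw [List.getElem?_append_left (by
            rw [hlen]
            calc b * N + c < b * N + N := by omega
              _ = (b + 1) * N := by ring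
              _ ≤ M * N := Nat.mul_le_mul_right _ (by omega))]
      have := pvRowsGetD N pl b c hpl.2 (by omega) hc
      simpa [hflat, List.getD_eq_getElem?_getD] using this
    | succ a =>
      have hidx : ((a + 1) * M + b) * N + c = M * N + ((a * M + b) * N + c) := by ring
      simp only [List.flatMap_cons, List.getD_eq_getElem?_getD, hidx]
      rw [List.getElem?_append_right (by omega), hlen, Nat.add_sub_cancel_left]
      have := ih a b c (fun x hx => hRect x (List.mem_cons_of_mem _ hx)) (by simpa using ha) hb hc
      simpa [List.getD_eq_getElem?_getD] using this

-- the pointwise fact: A's `next` is exactly indexing into the flattened source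
theorem pvNextA_eq_flat (arr : List (List (List Int))) (hrect : pvRect arr = true) (t : ℕ)
    (ht : t < arr.length * (arr.headD []).length * ((arr.headD []).headD []).length) :
    pvNextA arr (t : ℤ)
      = (arr.flatMap (fun plane => plane.flatMap (fun row => row))).getD t 0 := by
  have hR : ∀ pl ∈ arr, pl.length = (arr.headD []).length ∧
      ∀ r ∈ pl, r.length = ((arr.headD []).headD []).length := by
    intro pl hpl
    have h := (List.all_eq_true.mp hrect) pl hpl
    simp only [Bool.and_eq_true, beq_iff_eq, List.all_eq_true] at h
    exact ⟨h.1, h.2⟩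
  have hKpos : 0 < arr.length := by
    rcases Nat.eq_zero_or_pos arr.length with h | h
    · rw [h] at ht; simp at ht
    · exact h
  obtain ⟨a0, tl, rfl⟩ := List.exists_cons_of_ne_nil (List.ne_nil_of_length_pos hKpos)
  simp only [List.headD_cons] at hR ht ⊢
  have hMpos : 0 < a0.length := by
    rcases Nat.eq_zero_or_pos a0.length with h | h
    · rw [h] at ht; simp at ht
    · exact h
  obtain ⟨r0, rr, ha0⟩ := List.exists_cons_of_ne_nil (List.ne_nil_of_length_pos hMpos)
  have hhead : a0.headD [] = r0 := by rw [ha0]; rfl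
  rw [hhead] at hR ht
  have hNpos : 0 < r0.length := by
    rcases Nat.eq_zero_or_pos r0.length with h | h
    · rw [h] at ht; simp at ht
    · exact h
  have hget0 : PySem.List.pyGet? (a0 :: tl) 0 = some a0 := by
    rw [PySem.List.pyGet?_zero]; rfl
  have hget00 : PySem.List.pyGet? a0 0 = some r0 := by
    rw [PySem.List.pyGet?_zero, ha0]; rfl
  simp only [pvNextA, hget0, hget00]
  have hMN : ((a0.length : ℤ) * (r0.length : ℤ)) = ((a0.length * r0.length : ℕ) : ℤ) := by
    push_cast; ring
  have hRa0 := hR a0 (List.mem_cons_self ..)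
  by_cases hb1 : t < r0.length
  · -- branch 1: arr[0][0][idx]
    have hc1 : ((t : ℤ) < (r0.length : ℤ)) := by exact_mod_cast hb1
    rw [if_pos hc1]
    rw [PySem.List.pyGet?_eq_some_getElem _ (Int.natCast_nonneg _) (by exact_mod_cast hb1)]
    have hfg := pvFlatGetD a0.length r0.length (a0 :: tl) 0 0 t hR (by simp) hMpos hb1
    simp only [Nat.zero_mul, Nat.zero_add, List.getD_cons_zero] at hfg
    rw [hfg, ha0]
    simp [List.getD_eq_getElem?_getD, List.getElem?_eq_getElem hb1]
  · by_cases hb2 : t < a0.length * r0.length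
    · -- branch 2: arr[0][idx_m][idx_n]
      have hc1 : ¬ ((t : ℤ) < (r0.length : ℤ)) := by exact_mod_cast hb1
      have hc2 : ((r0.length : ℤ) ≤ (t : ℤ) ∧ (t : ℤ) < (a0.length : ℤ) * (r0.length : ℤ)) :=
        ⟨by exact_mod_cast Nat.le_of_not_lt hb1, by exact_mod_cast hb2⟩
      rw [if_neg hc1, if_pos hc2]
      have hbm : t / r0.length < a0.length := (Nat.div_lt_iff_lt_mul hNpos).mpr hb2
      have hmlt : t % r0.length < r0.length := Nat.mod_lt t hNpos
      have hin : ((t : ℤ) - PySem.Int.floordiv (t : ℤ) (r0.length : ℤ) * (r0.length : ℤ))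
          = ((t % r0.length : ℕ) : ℤ) := by
        rw [PySem.Int.floordiv_natCast]
        have h' : ((r0.length : ℤ) * ((t / r0.length : ℕ) : ℤ) + ((t % r0.length : ℕ) : ℤ)) = (t : ℤ) := by
          exact_mod_cast Nat.div_add_mod t r0.length
        linarith [h']
      rw [hin, PySem.Int.floordiv_natCast]
      rw [PySem.List.pyGet?_eq_some_getElem _ (Int.natCast_nonneg _) (by exact_mod_cast hbm)]
      simp only [Int.toNat_natCast, Option.bind_some]
      have hrow : a0[t / r0.length].length = r0.length :=
        hRa0.2 _ (List.getElem_mem _)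
      rw [PySem.List.pyGet?_eq_some_getElem _ (Int.natCast_nonneg _)
          (by rw [hrow]; exact_mod_cast hmlt)]
      have hdec : (0 * a0.length + t / r0.length) * r0.length + t % r0.length = t := by
        rw [Nat.zero_mul, Nat.zero_add, Nat.div_add_mod']
      have hfg := pvFlatGetD a0.length r0.length (a0 :: tl) 0 (t / r0.length) (t % r0.length)
        hR (by simp) hbm hmlt
      rw [hdec] at hfg
      rw [hfg, List.getD_cons_zero,
          List.getD_eq_getElem _ _ hbm,
          List.getD_eq_getElem _ _ (by rw [hrow]; exact hmlt)]
      simp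
      congr 1
    · -- branch 3: arr[idx_k][idx_m][idx_n]
      have hle : a0.length * r0.length ≤ t := Nat.le_of_not_lt hb2
      have hMNpos : 0 < a0.length * r0.length := Nat.mul_pos hMpos hNpos
      have hmlt : t % r0.length < r0.length := Nat.mod_lt t hNpos
      have hc1 : ¬ ((t : ℤ) < (r0.length : ℤ)) := by exact_mod_cast hb1
      have hc2 : ¬ ((r0.length : ℤ) ≤ (t : ℤ) ∧ (t : ℤ) < (a0.length : ℤ) * (r0.length : ℤ)) := by
        intro h
        exact hb2 (by exact_mod_cast h.2)
      have hc3 : ((a0.length : ℤ) * (r0.length : ℤ) ≤ (t : ℤ)) := by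
        rw [hMN]; exact_mod_cast hle
      have hc4 : ¬ ((a0.length : ℤ) * (r0.length : ℤ) = 0) := by
        rw [hMN]; exact_mod_cast hMNpos.ne'
      rw [if_neg hc1, if_neg hc2, if_pos hc3, if_neg hc4]
      have hsub : ((t : ℤ) - (a0.length : ℤ) * (r0.length : ℤ))
          = ((t - a0.length * r0.length : ℕ) : ℤ) := by
        rw [hMN, ← Nat.cast_sub hle]
      rw [hsub, hMN, PySem.Int.mod_natCast, ← Nat.mod_eq_sub_mod hle,
          PySem.Int.floordiv_natCast, PySem.Int.floordiv_natCast, PySem.Int.mod_natCast,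
          Nat.mod_mul_left_mod]
      have hka : t / (a0.length * r0.length) < (a0 :: tl).length :=
        (Nat.div_lt_iff_lt_mul hMNpos).mpr (by
          calc t < (a0 :: tl).length * a0.length * r0.length := ht
            _ = (a0 :: tl).length * (a0.length * r0.length) := by ring)
      have hbm : t % (a0.length * r0.length) / r0.length < a0.length :=
        (Nat.div_lt_iff_lt_mul hNpos).mpr (Nat.mod_lt t hMNpos)
      rw [PySem.List.pyGet?_eq_some_getElem _ (Int.natCast_nonneg _) (by exact_mod_cast hka)]
      simp only [Int.toNat_natCast, Option.bind_some]
      have hplane := hR _ (List.getElem_mem (l := a0 :: tl) (n := t / (a0.length * r0.length)) hka)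
      rw [PySem.List.pyGet?_eq_some_getElem _ (Int.natCast_nonneg _)
          (by rw [hplane.1]; exact_mod_cast hbm)]
      simp only [Int.toNat_natCast, Option.bind_some]
      have hrow := hplane.2 _ (List.getElem_mem
          (l := (a0 :: tl)[t / (a0.length * r0.length)])
          (n := t % (a0.length * r0.length) / r0.length)
          (by rw [hplane.1]; exact hbm))
      rw [PySem.List.pyGet?_eq_some_getElem _ (Int.natCast_nonneg _)
          (by rw [hrow]; exact_mod_cast hmlt)]
      have hdec : (t / (a0.length * r0.length) * a0.length + t % (a0.length * r0.length) / r0.length)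
            * r0.length + t % r0.length = t := by
        calc (t / (a0.length * r0.length) * a0.length + t % (a0.length * r0.length) / r0.length)
              * r0.length + t % r0.length
            = t / (a0.length * r0.length) * (a0.length * r0.length)
              + (t % (a0.length * r0.length) / r0.length * r0.length
                 + t % (a0.length * r0.length) % r0.length) := by
              rw [Nat.mod_mul_left_mod]; ring
          _ = t / (a0.length * r0.length) * (a0.length * r0.length)
              + t % (a0.length * r0.length) := by rw [Nat.div_add_mod']
          _ = t := Nat.div_add_mod' ..
      have hfg := pvFlatGetD a0.length r0.length (a0 :: tl)
        (t / (a0.length * r0.length)) (t % (a0.length * r0.length) / r0.length) (t % r0.length)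
        hR hka hbm hmlt
      rw [hdec] at hfg
      have e1 : (a0 :: tl).getD (t / (a0.length * r0.length)) []
          = (a0 :: tl)[t / (a0.length * r0.length)] := List.getD_eq_getElem _ _ hka
      have e2 : (a0 :: tl)[t / (a0.length * r0.length)].getD
            (t % (a0.length * r0.length) / r0.length) []
          = (a0 :: tl)[t / (a0.length * r0.length)][t % (a0.length * r0.length) / r0.length] :=
        List.getD_eq_getElem _ _ (by rw [hplane.1]; exact hbm)
      have e3 : (a0 :: tl)[t / (a0.length * r0.length)][t % (a0.length * r0.length) / r0.length].getD
            (t % r0.length) 0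
          = (a0 :: tl)[t / (a0.length * r0.length)][t % (a0.length * r0.length) / r0.length][t % r0.length] :=
        List.getD_eq_getElem _ _ (by rw [hrow]; exact hmlt)
      rw [hfg, e1, e2, e3]
      simp
      congr 1

-- ===== VERDICT (by name: the statement is the Claim_ definition above) =====
theorem reshape_array_spec : Claim_equal_reshape_array := by
  intro arr new_shape _dom pre
  obtain ⟨k, m, n⟩ := new_shape
  dsimp only [Pre_reshape_array] at pre
  unfold Spec_reshape_array
  rw [pvClosedA, pvClosedB]
  apply List.map_congr_left; intro i hi
  apply List.map_congr_left; intro j hj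
  apply List.map_congr_left; intro p hp
  rw [List.mem_range] at hi hj hp
  have hcells : 0 < k.toNat * m.toNat * n.toNat :=
    Nat.mul_pos (Nat.mul_pos (by omega) (by omega)) (by omega)
  rcases pre with h0 | ⟨hrect, hle⟩
  · omega
  · have htlt : m.toNat * n.toNat * i + n.toNat * j + p < k.toNat * m.toNat * n.toNat := by
      have h1 : m.toNat * n.toNat * i + n.toNat * j + p + 1 ≤ m.toNat * n.toNat * (i + 1) := by
        nlinarith
      have h2 : m.toNat * n.toNat * (i + 1) ≤ m.toNat * n.toNat * k.toNat := by
        exact Nat.mul_le_mul_left _ (by omega)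
      have h3 : m.toNat * n.toNat * k.toNat = k.toNat * m.toNat * n.toNat := by ring
      omega
    exact pvNextA_eq_flat arr hrect _ (by omega)
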